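-- pv_equiv track=rewrite | github.com/ChristopherAlphonse/re_learning_python | h.py | proces_element
-- ===== SOURCE A (Python) =====
-- from collections import deque
--
-- def proces_element(elements):
--     que = deque()
--     stk = []
--
--     for element in elements:
--         que.append(element)
--     while que:
--         item = que.popleft()
--         stk.append(item)
--
--         if len(stk) % 2 == 0 and que:
--             stk.pop()
--     return list(stk)
-- ===== SOURCE B (Python) =====
-- def proces_element(elements):
--     it = iter(elements)
--     try:
--         first = next(it)
--     except StopIteration:
--         return []
--     last = first
--     count = 1
--     for x in it:
--         last = x
--         count += 1
--     return [first] if count == 1 else [first, last]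
-- ===== Notes on version B (the rewrite author's own statement) =====
-- stated objective: simpler
-- what changed: Replaces the deque-to-stack parity simulation with a single pass keeping only the first element, the running last element and a count, returning [first] or [first,last] directly (no deque built or drained).
import Mathlib
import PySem

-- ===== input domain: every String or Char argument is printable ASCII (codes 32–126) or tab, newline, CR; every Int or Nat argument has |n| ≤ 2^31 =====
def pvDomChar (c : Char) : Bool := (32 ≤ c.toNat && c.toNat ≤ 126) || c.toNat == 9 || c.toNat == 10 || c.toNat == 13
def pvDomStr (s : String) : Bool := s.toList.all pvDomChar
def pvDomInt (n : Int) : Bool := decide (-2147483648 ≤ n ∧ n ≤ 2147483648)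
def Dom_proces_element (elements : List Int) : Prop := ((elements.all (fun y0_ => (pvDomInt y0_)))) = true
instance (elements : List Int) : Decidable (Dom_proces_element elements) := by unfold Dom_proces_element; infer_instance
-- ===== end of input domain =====

-- B replaces A's deque/stack parity simulation with one pass keeping first, last and a count (simpler, O(1) extra space).


-- ===== PORT A =====
-- while que: pop left into stk; if stk has even length and que is nonempty, pop stk.
def procesLoopA (que : List Int) (stk : List Int) : List Int :=
  match que with
  | [] => stk
  | item :: rest =>
      let stk' := stk ++ [item]
      let stk'' := if stk'.length % 2 == 0 && !rest.isEmpty then stk'.dropLast else stk'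
      procesLoopA rest stk''

def proces_element (elements : List Int) : List Int :=
  procesLoopA elements []

-- ===== PORT B =====
def proces_element_alt (elements : List Int) : List Int :=
  match elements with
  | [] => []
  | first :: rest =>
      let p := rest.foldl (fun (acc : Int × Int) x => (x, acc.2 + 1)) (first, 1)
      if p.2 == 1 then [first] else [first, p.1]

-- ===== PRECONDITION & SPEC =====
def Spec_proces_element (elements : List Int) (out : List Int) : Prop := out = proces_element_alt elements
instance (elements : List Int) (out : List Int) : Decidable (Spec_proces_element elements out) := by unfold Spec_proces_element; infer_instance

-- ===== CLAIM (what is proved, stated in full; the proofs are below) =====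
def Claim_equal_proces_element : Prop := ∀ (elements : List Int), Dom_proces_element elements → Spec_proces_element elements (proces_element elements)

-- ===== LEMMAS AND PROOFS =====

theorem procesLoopA_two (x : Int) (que : List Int) (h : que ≠ []) :
    procesLoopA que [x] = [x, que.getLast h] := by
  induction que with
  | nil => exact absurd rfl h
  | cons y rest ih =>
      cases rest with
      | nil => simp [procesLoopA]
      | cons z rs =>
          rw [procesLoopA]
          simp only [List.isEmpty_cons]
          norm_num
          rw [ih (by simp)]

theorem foldB (rest : List Int) (a c : Int) :
    rest.foldl (fun (acc : Int × Int) x => (x, acc.2 + 1)) (a, c)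
      = (rest.getLastD a, c + rest.length) := by
  induction rest generalizing a c with
  | nil => simp
  | cons y rs ih =>
      rw [List.foldl_cons, ih, List.getLastD_cons, List.length_cons]
      refine Prod.ext rfl ?_
      push_cast
      ring

theorem lastCons (y : Int) (rs : List Int) (h : y :: rs ≠ []) :
    (y :: rs).getLast h = rs.getLastD y := by
  induction rs generalizing y with
  | nil => simp [List.getLast, List.getLastD]
  | cons z zs ih => rw [List.getLast_cons (by simp), ih, List.getLastD_cons]

-- ===== VERDICT (by name: the statement is the Claim_ definition above) =====
theorem proces_element_spec : Claim_equal_proces_element := by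
  intro elements _
  unfold Spec_proces_element proces_element proces_element_alt
  cases elements with
  | nil => simp [procesLoopA]
  | cons first rest =>
      cases rest with
      | nil => simp [procesLoopA]
      | cons y rs =>
          rw [procesLoopA]
          simp only [List.isEmpty_cons, List.nil_append, List.length_cons]
          norm_num
          rw [procesLoopA_two first (y :: rs) (by simp),
            lastCons y rs (by simp), foldB]
          rw [if_neg (by omega)]
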